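-- pv_equiv track=rewrite | github.com/garretdgrant/UCLA | Python_with_applications/HW1/HW1.py | get_list_of_even_powers
-- ===== SOURCE A (Python) =====
-- def get_list_of_even_powers(L, k):
--     ''' Raise elements of a list to its even powers.
--     Args:
--         X: A list of non-negative integers.
--         k: A non-negative integer. May or may not be even.
--     Returns:
--         A list of lists. The ith element is a list
--         of the EVEN powers of X[i] from 0 to (and including) k,
--         in increasing order.
--     Example:
--         X = [5,6,7], k = 2
--         returns [[1, 25], [1, 36], [1, 49]]
--     '''
--     powers = []
--     for element in L:
--         power = []
--         for i in range(k+1):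
--             if i % 2 == 0:
--                 power.append(element**i)
--         powers.append(power)
--     return powers
-- ===== SOURCE B (Python) =====
-- def get_list_of_even_powers(L, k):
--     result = []
--     for x in L:
--         row = []
--         p = 1
--         e = 0
--         while e <= k:
--             row.append(p)
--             p *= x * x
--             e += 2
--         result.append(row)
--     return result
-- ===== Notes on version B (the rewrite author's own statement) =====
-- stated objective: simpler
-- what changed: Replaces the range(k+1) scan with a parity test and repeated exponentiation element**i by a while loop over even exponents threading a running product p multiplied by x*x each step.
import Mathlib
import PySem

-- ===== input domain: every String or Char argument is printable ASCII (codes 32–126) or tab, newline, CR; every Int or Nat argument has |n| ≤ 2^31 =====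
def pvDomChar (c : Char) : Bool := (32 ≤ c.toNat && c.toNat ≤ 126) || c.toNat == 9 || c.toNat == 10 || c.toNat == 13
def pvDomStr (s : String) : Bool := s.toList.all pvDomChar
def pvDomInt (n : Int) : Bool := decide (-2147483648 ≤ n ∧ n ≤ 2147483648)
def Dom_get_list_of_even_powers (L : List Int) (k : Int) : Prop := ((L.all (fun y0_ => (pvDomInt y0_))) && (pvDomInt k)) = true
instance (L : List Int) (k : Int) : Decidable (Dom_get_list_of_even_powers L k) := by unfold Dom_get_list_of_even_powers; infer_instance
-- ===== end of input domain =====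

-- B replaces the range(k+1) scan with parity test and repeated exponentiation by a
-- while loop over even exponents threading a running product (objective: simpler).

-- ===== PORT A =====
def get_list_of_even_powers (L : List Int) (k : Int) : List (List Int) :=
  L.foldl (fun powers element =>
    powers ++ [(PySem.List.pyRange 0 (k + 1) 1).foldl (fun power i =>
      if PySem.Int.mod i 2 == 0 then power ++ [element ^ i.toNat] else power) []]) []

-- ===== PORT B =====
-- the 'while e <= k' loop of Source B; terminates because k + 1 - e shrinks
def pvLoopB (x k : Int) (p e : Int) (row : List Int) : List Int :=
  if e ≤ k then pvLoopB x k (p * (x * x)) (e + 2) (row ++ [p]) else row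
termination_by (k + 1 - e).toNat
decreasing_by omega

def get_list_of_even_powers_alt (L : List Int) (k : Int) : List (List Int) :=
  L.foldl (fun result x => result ++ [pvLoopB x k 1 0 []]) []

-- ===== PRECONDITION & SPEC =====
def Spec_get_list_of_even_powers (L : List Int) (k : Int) (out : List (List Int)) : Prop := out = get_list_of_even_powers_alt L k
instance (L : List Int) (k : Int) (out : List (List Int)) : Decidable (Spec_get_list_of_even_powers L k out) := by unfold Spec_get_list_of_even_powers; infer_instance

-- ===== CLAIM (what is proved, stated in full; the proofs are below) =====
def Claim_equal_get_list_of_even_powers : Prop := ∀ (L : List Int) (k : Int), Dom_get_list_of_even_powers L k → Spec_get_list_of_even_powers L k (get_list_of_even_powers L k)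

-- ===== LEMMAS AND PROOFS =====

theorem pvLoopB_eq (x k : Int) : ∀ (n : Nat) (e : Int), 0 ≤ e → e % 2 = 0 → (k + 1 - e).toNat ≤ n → ∀ row : List Int,
    pvLoopB x k (x ^ e.toNat) e row =
      row ++ ((PySem.List.pyRange e (k + 1) 1).filter (fun i => PySem.Int.mod i 2 == 0)).map (fun i => x ^ i.toNat) := by
  intro n
  induction n with
  | zero =>
    intro e he hev hn row
    rw [pvLoopB, if_neg (by omega), PySem.List.pyRange_one_eq_nil (by omega)]
    simp
  | succ m ih =>
    intro e he hev hn row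
    by_cases hek : e ≤ k
    · rw [pvLoopB, if_pos hek]
      have hx : x ^ e.toNat * (x * x) = x ^ (e + 2).toNat := by
        have : (e + 2).toNat = e.toNat + 2 := by omega
        rw [this, pow_succ, pow_succ]; ring
      rw [hx, ih (e + 2) (by omega) (by omega) (by omega)]
      rw [PySem.List.pyRange_one_cons (by omega : e < k + 1)]
      have hme : (PySem.Int.mod e 2 == 0) = true := by
        rw [PySem.Int.mod_eq_emod_of_pos (by norm_num)]; simp [hev]
      rw [List.filter_cons, if_pos hme, List.map_cons]
      have htail : (PySem.List.pyRange (e + 1) (k + 1) 1).filter (fun i => PySem.Int.mod i 2 == 0)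
          = (PySem.List.pyRange (e + 2) (k + 1) 1).filter (fun i => PySem.Int.mod i 2 == 0) := by
        by_cases h : e + 1 < k + 1
        · rw [PySem.List.pyRange_one_cons h, List.filter_cons]
          have hodd : ((PySem.Int.mod (e + 1) 2 == 0) = false) := by
            rw [PySem.Int.mod_eq_emod_of_pos (by norm_num)]
            simp; omega
          have h12 : e + 1 + 1 = e + 2 := by ring
          rw [hodd, h12]
          simp
        · rw [PySem.List.pyRange_one_eq_nil (by omega), PySem.List.pyRange_one_eq_nil (by omega)]
      rw [htail]
      simp
    · rw [pvLoopB, if_neg hek, PySem.List.pyRange_one_eq_nil (by omega)]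
      simp

theorem pvLoopB_inner (x k : Int) :
    pvLoopB x k 1 0 [] =
      ((PySem.List.pyRange 0 (k + 1) 1).filter (fun i => PySem.Int.mod i 2 == 0)).map (fun i => x ^ i.toNat) := by
  have h := pvLoopB_eq x k (k + 1).toNat 0 (by omega) (by omega) (by omega) []
  simpa using h

-- ===== VERDICT (by name: the statement is the Claim_ definition above) =====
theorem get_list_of_even_powers_spec : Claim_equal_get_list_of_even_powers := by
  intro L k _
  unfold Spec_get_list_of_even_powers get_list_of_even_powers get_list_of_even_powers_alt
  rw [PySem.List.foldl_append_singleton_eq_map, PySem.List.foldl_append_singleton_eq_map]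
  congr 1
  apply List.map_congr_left
  intro x _
  rw [PySem.List.foldl_append_if, pvLoopB_inner]
  simp
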